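-- pv_equiv track=rewrite | github.com/wilmurillo-ai/Design-Assistant | .skills/openclaw-skills/skills/liruozhou/anima-aios/core/native_importer.py | _split_by_sub_headings
-- ===== SOURCE A (Python) =====
-- from typing import Dict, List, Optional, Tuple
--
-- def _split_by_sub_headings(parent_title: str,
--                             content: str) -> List[Dict]:
--     """按 ### 子标题二次分段"""
--     sections = []
--     current_sub = parent_title
--     current_lines = []
--
--     for line in content.split('\n'):
--         if line.startswith('### '):
--             if current_lines:
--                 sections.append({
--                     'title': current_sub,
--                     'body': '\n'.join(current_lines),
--                 })
--             current_sub = f"{parent_title} > {line.lstrip('#').strip()}"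
--             current_lines = []
--         else:
--             current_lines.append(line)
--
--     if current_lines:
--         sections.append({
--             'title': current_sub,
--             'body': '\n'.join(current_lines),
--         })
--
--     return sections
-- ===== SOURCE B (Python) =====
-- def _split_by_sub_headings(parent_title: str, content: str):
--     """Recursive decomposition: peel off one segment at a time up to the next '### ' heading."""
--     def go(sub, lines):
--         i = 0
--         while i < len(lines) and not lines[i].startswith('### '):
--             i += 1
--         body, rest = lines[:i], lines[i:]
--         out = [{'title': sub, 'body': '\n'.join(body)}] if body else []
--         if rest:
--             out += go(f"{parent_title} > {rest[0].lstrip('#').strip()}", rest[1:])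
--         return out
--     return go(parent_title, content.split('\n'))
-- ===== Notes on version B (the rewrite author's own statement) =====
-- stated objective: alternative
-- what changed: A's single pass with a mutable (current_sub, current_lines, sections) accumulator is replaced by a recursive segment-peeling decomposition: each call scans to the next '### ' heading, slices off that segment, emits it if non-empty, and recurses on the remainder.
import Mathlib
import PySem

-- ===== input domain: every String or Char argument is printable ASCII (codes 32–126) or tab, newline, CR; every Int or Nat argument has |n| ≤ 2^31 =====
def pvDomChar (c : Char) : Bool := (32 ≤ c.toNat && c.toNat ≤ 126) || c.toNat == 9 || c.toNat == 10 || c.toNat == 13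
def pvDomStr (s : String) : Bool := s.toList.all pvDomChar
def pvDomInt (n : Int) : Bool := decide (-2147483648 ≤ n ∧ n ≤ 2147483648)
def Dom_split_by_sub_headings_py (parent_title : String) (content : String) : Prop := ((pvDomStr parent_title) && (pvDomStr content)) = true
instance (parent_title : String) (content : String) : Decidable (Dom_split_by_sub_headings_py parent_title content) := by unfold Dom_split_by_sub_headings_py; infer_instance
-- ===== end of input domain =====

-- B replaces A's single accumulator loop by a recursive peel-off-one-segment decomposition (objective: alternative).

-- ===== PORT A =====
-- content.split('\n'): split? is none only for sep = "", so getD [] is unreachable for sep "\n"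
def pvLines (content : String) : List String := (PySem.Str.split? content "\n").getD []

-- f"{parent_title} > {line.lstrip('#').strip()}"; lstrip('#') ported by hand as dropWhile (· == '#') (exact: strips leading '#')
def pvTitle (parent_title line : String) : String :=
  parent_title ++ " > " ++ PySem.Str.strip (String.ofList (line.toList.dropWhile (· == '#')))

-- loop body of A: state = (sections, current_sub, current_lines)
def pvA_step (parent_title : String)
    (st : List (List (String × String)) × String × List String) (line : String) :
    List (List (String × String)) × String × List String :=
  if PySem.Str.startswith line "### " then
    ((if st.2.2 ≠ [] then st.1 ++ [[("title", st.2.1), ("body", PySem.Str.join "\n" st.2.2)]] else st.1),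
     pvTitle parent_title line, [])
  else
    (st.1, st.2.1, st.2.2 ++ [line])

def split_by_sub_headings_py (parent_title : String) (content : String) : List (List (String × String)) :=
  let st := (pvLines content).foldl (pvA_step parent_title) ([], parent_title, [])
  if st.2.2 ≠ [] then st.1 ++ [[("title", st.2.1), ("body", PySem.Str.join "\n" st.2.2)]] else st.1

-- ===== PORT B =====
-- Source B's go: take the block of non-heading lines (the index scan = takeWhile/dropWhile span), emit it, recurse past the heading
def pvB_go (parent_title : String) (sub : String) (lines : List String) : List (List (String × String)) :=
  let body := lines.takeWhile (fun l => !PySem.Str.startswith l "### ")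
  (if body ≠ [] then [[("title", sub), ("body", PySem.Str.join "\n" body)]] else []) ++
  (match hrest : lines.dropWhile (fun l => !PySem.Str.startswith l "### ") with
   | [] => []
   | h :: t => pvB_go parent_title (pvTitle parent_title h) t)
termination_by lines.length
decreasing_by
  have hl := (List.dropWhile_sublist (l := lines) (fun l => !PySem.Str.startswith l "### ")).length_le
  rw [hrest] at hl
  simp at hl
  omega

def split_by_sub_headings_py_alt (parent_title : String) (content : String) : List (List (String × String)) :=
  pvB_go parent_title parent_title (pvLines content)

-- ===== PRECONDITION & SPEC =====
def Spec_split_by_sub_headings_py (parent_title : String) (content : String) (out : List (List (String × String))) : Prop := out = split_by_sub_headings_py_alt parent_title content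
instance (parent_title : String) (content : String) (out : List (List (String × String))) : Decidable (Spec_split_by_sub_headings_py parent_title content out) := by unfold Spec_split_by_sub_headings_py; infer_instance

-- ===== CLAIM (what is proved, stated in full; the proofs are below) =====
def Claim_equal_split_by_sub_headings_py : Prop := ∀ (parent_title : String) (content : String), Dom_split_by_sub_headings_py parent_title content → Spec_split_by_sub_headings_py parent_title content (split_by_sub_headings_py parent_title content)

-- ===== LEMMAS AND PROOFS =====

-- A's loop with the final flush, written as a recursion on the remaining lines
def pvH (p sub : String) (cur : List String) (lines : List String) : List (List (String × String)) :=
  match lines with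
  | [] => if cur ≠ [] then [[("title", sub), ("body", PySem.Str.join "\n" cur)]] else []
  | l :: ls =>
    if PySem.Str.startswith l "### " then
      (if cur ≠ [] then [[("title", sub), ("body", PySem.Str.join "\n" cur)]] else [])
        ++ pvH p (pvTitle p l) [] ls
    else pvH p sub (cur ++ [l]) ls

theorem pvB_go_unfold (p sub : String) (lines : List String) :
    pvB_go p sub lines =
      (if lines.takeWhile (fun l => !PySem.Str.startswith l "### ") ≠ [] then
        [[("title", sub), ("body", PySem.Str.join "\n" (lines.takeWhile (fun l => !PySem.Str.startswith l "### ")))]] else []) ++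
      (match lines.dropWhile (fun l => !PySem.Str.startswith l "### ") with
       | [] => []
       | h :: t => pvB_go p (pvTitle p h) t) := by
  rw [pvB_go.eq_def]
  split <;> rename_i heq <;> rw [heq]

theorem pvA_foldl_eq_pvH (p : String) (lines : List String) :
    ∀ (secs : List (List (String × String))) (sub : String) (cur : List String),
    (let st := lines.foldl (pvA_step p) (secs, sub, cur)
     if st.2.2 ≠ [] then st.1 ++ [[("title", st.2.1), ("body", PySem.Str.join "\n" st.2.2)]] else st.1)
    = secs ++ pvH p sub cur lines := by
  induction lines with
  | nil => intro secs sub cur; simp [pvH]; split <;> simp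
  | cons l ls ih =>
    intro secs sub cur
    simp only [List.foldl_cons, pvH, pvA_step]
    by_cases h : PySem.Str.startswith l "### " = true
    · simp only [h, if_pos trivial, ih]
      by_cases hc : cur = [] <;> simp [hc]
    · simp only [h]
      simp [ih]

theorem pvH_eq_go (p : String) (lines : List String) :
    ∀ (sub : String) (cur : List String),
    pvH p sub cur lines =
      (if cur ++ lines.takeWhile (fun l => !PySem.Str.startswith l "### ") ≠ [] then
        [[("title", sub), ("body", PySem.Str.join "\n" (cur ++ lines.takeWhile (fun l => !PySem.Str.startswith l "### ")))]] else [])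
      ++ (match lines.dropWhile (fun l => !PySem.Str.startswith l "### ") with
          | [] => []
          | h :: t => pvB_go p (pvTitle p h) t) := by
  induction lines with
  | nil => intro sub cur; simp [pvH]
  | cons l ls ih =>
    intro sub cur
    by_cases h : PySem.Str.startswith l "### " = true
    · rw [pvH, if_pos h, ih _ []]
      simp only [List.nil_append]
      rw [← pvB_go_unfold]
      have h2 : PySem.Chars.startswith l.toList ['#', '#', '#', ' '] = true := by
        have := h; simp [PySem.Str.startswith_eq] at this
        simpa using this
      simp [h2]
    · rw [pvH, if_neg h, ih sub (cur ++ [l])]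
      have h2 : PySem.Chars.startswith l.toList ['#', '#', '#', ' '] = false := by
        cases hb : PySem.Chars.startswith l.toList ['#', '#', '#', ' ']
        · rfl
        · exact absurd (by simp [PySem.Str.startswith_eq]; simpa using hb) h
      simp [h2, List.append_assoc]

theorem pvH_eq_pvB_go (p sub : String) (lines : List String) :
    pvH p sub [] lines = pvB_go p sub lines := by
  rw [pvH_eq_go]
  simp only [List.nil_append]
  rw [← pvB_go_unfold]

-- ===== VERDICT (by name: the statement is the Claim_ definition above) =====
theorem split_by_sub_headings_py_spec : Claim_equal_split_by_sub_headings_py := by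
  intro p c _
  show _ = _
  unfold split_by_sub_headings_py split_by_sub_headings_py_alt
  rw [← pvH_eq_pvB_go]
  simpa using pvA_foldl_eq_pvH p (pvLines c) [] p []
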